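-- pv_equiv track=rewrite | github.com/alekos-bigo/aisd-labs | lab6/hashandcrc8.py | additive_hash
-- ===== SOURCE A (Python) =====
-- p = 2 ** 64
--
-- m = 11
--
-- def additive_hash(str_pwd):
--     if len(str_pwd) < m:
--         str_pwd += '*'
--     while len(str_pwd) < m:
--         str_pwd += '0'
--
--     int_pwd = 0
--     # k = 31
--     # l = 0
--     for i in str_pwd:
--         # int_pwd += ord(i) * (k ** l)
--         # l += 1
--         int_pwd += ord(i)
--     return int_pwd % p
-- ===== SOURCE B (Python) =====
-- p = 2 ** 64
--
-- m = 11
--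
-- def additive_hash(str_pwd):
--     # Closed-form padding: instead of building the padded string, add the
--     # padding's code-point contribution arithmetically.
--     n = len(str_pwd)
--     total = sum(ord(c) for c in str_pwd)
--     if n < m:
--         total += 42 + 48 * (m - 1 - n)   # pad marker plus (m-1-n) fillers
--     return total % p
-- ===== Notes on version B (the rewrite author's own statement) =====
-- stated objective: simpler
-- what changed: B never builds the padded string: it sums the original characters once and adds the padding contribution in closed form (42 + 48*(m-1-n)), removing the append loop and the traversal of padding characters.
import Mathlib
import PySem

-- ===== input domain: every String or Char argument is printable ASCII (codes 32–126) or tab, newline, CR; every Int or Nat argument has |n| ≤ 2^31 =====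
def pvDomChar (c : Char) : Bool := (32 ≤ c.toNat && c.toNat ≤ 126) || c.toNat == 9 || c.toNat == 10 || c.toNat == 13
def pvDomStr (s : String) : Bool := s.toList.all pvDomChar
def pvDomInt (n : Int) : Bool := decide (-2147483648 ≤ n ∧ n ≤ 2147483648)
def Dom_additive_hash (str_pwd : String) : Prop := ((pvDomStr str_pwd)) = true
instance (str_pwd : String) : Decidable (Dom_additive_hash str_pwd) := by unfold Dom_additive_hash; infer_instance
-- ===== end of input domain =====

-- B avoids building the padded string: it sums the original characters once and
-- adds the padding contribution in closed form (42 + 48*(m-1-n)).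

-- ===== PORT A =====
-- the while-loop 'while len < 11: s += "0"' as structural recursion on 11 - length
def padZeros (cs : List Char) : List Char :=
  if cs.length < 11 then padZeros (cs ++ ['0']) else cs
  termination_by 11 - cs.length
  decreasing_by simp_all; omega

def additive_hash (str_pwd : String) : Int :=
  let cs0 := str_pwd.toList
  let cs1 := if cs0.length < 11 then cs0 ++ ['*'] else cs0
  let cs2 := padZeros cs1
  (cs2.foldl (fun acc c => acc + (c.toNat : Int)) 0) % (2 ^ 64)

-- ===== PORT B =====
def additive_hash_alt (str_pwd : String) : Int :=
  let n := str_pwd.toList.length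
  let total := (str_pwd.toList.map (fun c => (c.toNat : Int))).sum
  let total := if n < 11 then total + (42 + 48 * (11 - 1 - (n : Int))) else total
  total % (2 ^ 64)

-- ===== PRECONDITION & SPEC =====
def Spec_additive_hash (str_pwd : String) (out : Int) : Prop := out = additive_hash_alt str_pwd
instance (str_pwd : String) (out : Int) : Decidable (Spec_additive_hash str_pwd out) := by unfold Spec_additive_hash; infer_instance

-- ===== CLAIM (what is proved, stated in full; the proofs are below) =====
def Claim_equal_additive_hash : Prop := ∀ (str_pwd : String), Dom_additive_hash str_pwd → Spec_additive_hash str_pwd (additive_hash str_pwd)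

-- ===== LEMMAS AND PROOFS =====

theorem foldl_add_toNat (cs : List Char) (a : Int) :
    cs.foldl (fun acc c => acc + (c.toNat : Int)) a
      = a + (cs.map (fun c => (c.toNat : Int))).sum := by
  induction cs generalizing a with
  | nil => simp
  | cons c t ih => simp [List.foldl, ih]; ring

theorem padZeros_sum (cs : List Char) :
    (padZeros cs |>.map (fun c => (c.toNat : Int))).sum
      = (cs.map (fun c => (c.toNat : Int))).sum + 48 * ((11 : Int) - cs.length) ∨
    (11 ≤ cs.length ∧ padZeros cs = cs) := by
  by_cases h : cs.length < 11
  · left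
    have : ∀ k (cs : List Char), cs.length + k = 11 →
        (padZeros cs |>.map (fun c => (c.toNat : Int))).sum
          = (cs.map (fun c => (c.toNat : Int))).sum + 48 * ((11 : Int) - cs.length) := by
      intro k
      induction k with
      | zero =>
        intro cs hk
        rw [padZeros]
        have hnlt : ¬ cs.length < 11 := by omega
        rw [if_neg hnlt]
        have h11 : (cs.length : Int) = 11 := by omega
        rw [h11]; ring
      | succ k ih =>
        intro cs hk
        rw [padZeros]
        have hlt : cs.length < 11 := by omega
        simp only [hlt, if_true]
        have := ih (cs ++ ['0']) (by simp; omega)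
        rw [this]
        simp only [List.map_append, List.sum_append, List.length_append]
        simp
        ring
    exact this (11 - cs.length) cs (by omega)
  · right
    constructor
    · omega
    · rw [padZeros]; simp [h]

theorem padZeros_eq_of_ge (cs : List Char) (h : ¬ cs.length < 11) : padZeros cs = cs := by
  rw [padZeros]; simp [h]

theorem additive_hash_spec : Claim_equal_additive_hash := by
  intro s _
  unfold Spec_additive_hash additive_hash additive_hash_alt
  simp only
  by_cases h : s.toList.length < 11
  · rw [if_pos h, if_pos h, foldl_add_toNat]
    rcases padZeros_sum (s.toList ++ ['*']) with hsum | ⟨hge, heq⟩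
    · rw [hsum]
      congr 1
      simp
      ring
    · -- here (s.toList ++ ['*']).length = 11, i.e. s.toList.length = 10
      simp only [List.length_append, List.length_cons, List.length_nil] at hge
      have h10 : s.toList.length = 10 := by omega
      rw [heq]
      congr 1
      simp [h10]
  · rw [if_neg h, if_neg h, padZeros_eq_of_ge _ h, foldl_add_toNat]
    simp
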